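-- pv_equiv track=rewrite | github.com/manimovassagh/flaky-test-analyzer | src/generate_sample_data.py | make_test_names
-- ===== SOURCE A (Python) =====
-- def make_test_names(n: int) -> list[tuple[str, str]]:
--     pages = ["HomePage", "LoginPage", "CheckoutPage", "SearchPage", "ProductPage",
--              "CartPage", "AccountPage", "OrderPage", "ProfilePage", "ContactPage"]
--     actions = ["Load", "Submit", "Navigate", "Click", "Fill", "Validate",
--                "Verify", "Assert", "Check", "Confirm"]
--     scenarios = ["HappyPath", "WithError", "WithRetry", "OnMobile", "OnDesktop",
--                  "WithAuth", "Anonymous", "Slow", "Fast", "WithNetwork"]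
--     names = []
--     for i in range(n):
--         page = pages[i % len(pages)]
--         action = actions[(i // len(pages)) % len(actions)]
--         scenario = scenarios[(i // (len(pages) * len(actions))) % len(scenarios)]
--         test_name = f"{page}_{action}_{scenario}_{i:04d}"
--         full_name = f"Tests.{page}.{test_name}"
--         names.append((test_name, full_name))
--     return names
-- ===== SOURCE B (Python) =====
-- def make_test_names(n: int) -> list[tuple[str, str]]:
--     pages = ["HomePage", "LoginPage", "CheckoutPage", "SearchPage", "ProductPage",
--              "CartPage", "AccountPage", "OrderPage", "ProfilePage", "ContactPage"]
--     actions = ["Load", "Submit", "Navigate", "Click", "Fill", "Validate",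
--                "Verify", "Assert", "Check", "Confirm"]
--     scenarios = ["HappyPath", "WithError", "WithRetry", "OnMobile", "OnDesktop",
--                  "WithAuth", "Anonymous", "Slow", "Fast", "WithNetwork"]
--     # precompute all 1000 combinations once; page varies fastest, matching A's mixed-radix order
--     combos = [(s, a, p) for s in scenarios for a in actions for p in pages]
--     names = []
--     for i in range(n):
--         scenario, action, page = combos[i % 1000]
--         test_name = f"{page}_{action}_{scenario}_{i:04d}"
--         names.append((test_name, f"Tests.{page}.{test_name}"))
--     return names
-- ===== Notes on version B (the rewrite author's own statement) =====
-- stated objective: alternative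
-- what changed: B precomputes the full (scenario, action, page) combination table once and picks each triple with a single index-mod lookup per element, instead of A's per-iteration mixed-radix mod/div indexing into the three separate lists.
import Mathlib
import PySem

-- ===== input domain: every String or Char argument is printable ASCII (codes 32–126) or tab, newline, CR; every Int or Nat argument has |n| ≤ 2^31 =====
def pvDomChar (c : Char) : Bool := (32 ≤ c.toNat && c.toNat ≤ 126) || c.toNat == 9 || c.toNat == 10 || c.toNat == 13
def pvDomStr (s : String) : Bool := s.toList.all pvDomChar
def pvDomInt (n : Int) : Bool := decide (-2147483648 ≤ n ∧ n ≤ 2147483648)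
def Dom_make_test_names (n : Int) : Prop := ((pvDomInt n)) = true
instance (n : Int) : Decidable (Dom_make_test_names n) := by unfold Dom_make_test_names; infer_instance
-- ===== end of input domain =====

-- B replaces A's per-iteration mixed-radix index arithmetic (three mod/div lookups) by a
-- prebuilt 1000-entry combination table indexed once with i % 1000 (objective: alternative).

-- The three constant name lists, shared literally by both Python versions.
def pvPages : List String := ["HomePage", "LoginPage", "CheckoutPage", "SearchPage", "ProductPage",
  "CartPage", "AccountPage", "OrderPage", "ProfilePage", "ContactPage"]
def pvActions : List String := ["Load", "Submit", "Navigate", "Click", "Fill", "Validate",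
  "Verify", "Assert", "Check", "Confirm"]
def pvScenarios : List String := ["HappyPath", "WithError", "WithRetry", "OnMobile", "OnDesktop",
  "WithAuth", "Anonymous", "Slow", "Fast", "WithNetwork"]

-- f"{i:04d}"; exact for 0 ≤ i (both loops only format the nonnegative range index i).
def pvFmt04 (i : Int) : String :=
  String.ofList (List.replicate (4 - (PySem.Int.toChars i).length) '0' ++ PySem.Int.toChars i)

-- ===== PORT A =====
def make_test_names (n : Int) : List (String × String) :=
  -- names.append(...) in a 'for i in range(n)' loop = one output element per i, in order
  (PySem.List.pyRange 0 n 1).map (fun i =>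
    let page := PySem.List.pyGetD pvPages (PySem.Int.mod i 10) ""
    let action := PySem.List.pyGetD pvActions (PySem.Int.mod (PySem.Int.floordiv i 10) 10) ""
    let scenario := PySem.List.pyGetD pvScenarios (PySem.Int.mod (PySem.Int.floordiv i 100) 10) ""
    let test_name := page ++ "_" ++ action ++ "_" ++ scenario ++ "_" ++ pvFmt04 i
    (test_name, "Tests." ++ page ++ "." ++ test_name))

-- ===== PORT B =====
-- combos = [(s, a, p) for s in scenarios for a in actions for p in pages]
def pvCombos : List (String × String × String) :=
  pvScenarios.flatMap fun s => pvActions.flatMap fun a => pvPages.map fun p => (s, a, p)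

def make_test_names_alt (n : Int) : List (String × String) :=
  (PySem.List.pyRange 0 n 1).map (fun i =>
    let c := PySem.List.pyGetD pvCombos (PySem.Int.mod i 1000) ("", "", "")
    let test_name := c.2.2 ++ "_" ++ c.2.1 ++ "_" ++ c.1 ++ "_" ++ pvFmt04 i
    (test_name, "Tests." ++ c.2.2 ++ "." ++ test_name))

-- ===== PRECONDITION & SPEC =====
def Spec_make_test_names (n : Int) (out : List (String × String)) : Prop := out = make_test_names_alt n
instance (n : Int) (out : List (String × String)) : Decidable (Spec_make_test_names n out) := by unfold Spec_make_test_names; infer_instance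

-- ===== CLAIM (what is proved, stated in full; the proofs are below) =====
def Claim_equal_make_test_names : Prop := ∀ (n : Int), Dom_make_test_names n → Spec_make_test_names n (make_test_names n)

-- ===== LEMMAS AND PROOFS =====

-- Indexing a flatMap whose blocks all have the same length m.
theorem pvGetElem?_flatMap_const {α β : Type} (f : α → List β) (m : Nat) (hm : 0 < m)
    (hf : ∀ x, (f x).length = m) :
    ∀ (l : List α) (k : Nat), (l.flatMap f)[k]? = l[k / m]?.bind (fun x => (f x)[k % m]?) := by
  intro l
  induction l with
  | nil => intro k; simp
  | cons x l ih =>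
    intro k
    rw [List.flatMap_cons]
    by_cases hk : k < m
    · rw [List.getElem?_append_left (by rw [hf]; exact hk),
        Nat.div_eq_of_lt hk, Nat.mod_eq_of_lt hk]
      simp
    · obtain ⟨j, rfl⟩ : ∃ j, k = m + j := ⟨k - m, by omega⟩
      rw [List.getElem?_append_right (by rw [hf]; omega), hf,
        show m + j - m = j from by omega, ih j,
        Nat.add_mod_left m j, Nat.add_comm m j, Nat.add_div_right j hm,
        List.getElem?_cons_succ]

theorem pvCombos_getD (r : Nat) (hr : r < 1000) :
    pvCombos.getD r ("", "", "") =
      (pvScenarios.getD (r / 100) "", pvActions.getD (r / 10 % 10) "",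
        pvPages.getD (r % 10) "") := by
  have h100 : ∀ s, ((pvActions.flatMap fun a => pvPages.map fun p => (s, a, p)) :
      List (String × String × String)).length = 100 := by
    intro s; simp [pvActions, pvPages]
  have h10 : ∀ (s a : String), ((pvPages.map fun p => (s, a, p)) :
      List (String × String × String)).length = 10 := by
    intro s a; simp [pvPages]
  have hs : r / 100 < pvScenarios.length := by simp [pvScenarios]; omega
  have ha : r % 100 / 10 < pvActions.length := by simp [pvActions]; omega
  have hp : r % 100 % 10 < pvPages.length := by simp [pvPages]; omega
  rw [List.getD_eq_getElem?_getD, pvCombos,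
    pvGetElem?_flatMap_const _ 100 (by omega) h100,
    List.getElem?_eq_getElem hs, Option.bind_some,
    pvGetElem?_flatMap_const _ 10 (by omega) (h10 _),
    List.getElem?_eq_getElem ha, Option.bind_some,
    List.getElem?_map, List.getElem?_eq_getElem hp]
  rw [List.getD_eq_getElem?_getD, List.getElem?_eq_getElem hs,
    List.getD_eq_getElem?_getD, List.getElem?_eq_getElem (show r / 10 % 10 < pvActions.length from by simp [pvActions]; omega),
    List.getD_eq_getElem?_getD, List.getElem?_eq_getElem (show r % 10 < pvPages.length from by simp [pvPages]; omega)]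
  simp only [Option.map_some, Option.getD_some]
  simp only [show r % 100 / 10 = r / 10 % 10 from by omega,
    show r % 100 % 10 = r % 10 from by omega]

theorem make_test_names_spec : Claim_equal_make_test_names := by
  intro n _
  unfold Spec_make_test_names make_test_names make_test_names_alt
  apply List.map_congr_left
  intro i hi
  have h0 : (0 : Int) ≤ i := ((PySem.List.mem_pyRange_one.mp hi).1)
  obtain ⟨m, rfl⟩ : ∃ m : Nat, i = (m : Int) := ⟨i.toNat, (Int.toNat_of_nonneg h0).symm⟩
  have e10 : PySem.Int.mod (m : Int) 10 = ((m % 10 : Nat) : Int) := by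
    rw [PySem.Int.mod_eq_emod_of_pos (by norm_num)]; omega
  have e1000 : PySem.Int.mod (m : Int) 1000 = ((m % 1000 : Nat) : Int) := by
    rw [PySem.Int.mod_eq_emod_of_pos (by norm_num)]; omega
  have eA10 : PySem.Int.mod (PySem.Int.floordiv (m : Int) 10) 10 = ((m / 10 % 10 : Nat) : Int) := by
    rw [PySem.Int.floordiv_eq_ediv_of_pos (by norm_num),
      PySem.Int.mod_eq_emod_of_pos (by norm_num)]; omega
  have eA100 : PySem.Int.mod (PySem.Int.floordiv (m : Int) 100) 10 = ((m / 100 % 10 : Nat) : Int) := by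
    rw [PySem.Int.floordiv_eq_ediv_of_pos (by norm_num),
      PySem.Int.mod_eq_emod_of_pos (by norm_num)]; omega
  simp only [e10, e1000, eA10, eA100, PySem.List.pyGetD_natCast]
  rw [pvCombos_getD (m % 1000) (by omega),
    show m % 1000 / 100 = m / 100 % 10 from by omega,
    show m % 1000 / 10 % 10 = m / 10 % 10 from by omega,
    show m % 1000 % 10 = m % 10 from by omega]
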